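-- pv_equiv track=rewrite | github.com/go-hare/emoticorebot | emoticorebot/agent/context.py | _collect_h2_sections
-- ===== SOURCE A (Python) =====
-- def _collect_h2_sections(content: str) -> dict[str, str]:
--     sections: dict[str, str] = {}
--     current_heading = ""
--     buffer: list[str] = []
--
--     for raw in content.splitlines():
--         line = raw.rstrip()
--         if line.startswith("## "):
--             if current_heading:
--                 body = "\n".join(buffer).strip()
--                 if body:
--                     sections[current_heading] = body
--             current_heading = line.strip()
--             buffer = []
--             continue
--         if current_heading:
--             buffer.append(line)
--
--     if current_heading:
--         body = "\n".join(buffer).strip()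
--         if body:
--             sections[current_heading] = body
--
--     return sections
-- ===== SOURCE B (Python) =====
-- def _span_body(lines):
--     """Split lines into (body, rest): body is the run of non-heading lines at the
--     front, rest starts at the first '## ' heading (or is empty)."""
--     k = 0
--     while k < len(lines) and not lines[k].startswith("## "):
--         k += 1
--     return lines[:k], lines[k:]
--
--
-- def _collect_h2_sections(content: str) -> dict[str, str]:
--     lines = [raw.rstrip() for raw in content.splitlines()]
--     sections: dict[str, str] = {}
--     _, rest = _span_body(lines)          # drop everything before the first heading
--     while rest:
--         heading, tail = rest[0], rest[1:]
--         body_lines, rest = _span_body(tail)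
--         body = "\n".join(body_lines).strip()
--         if body:
--             sections[heading] = body
--     return sections
-- ===== Notes on version B (the rewrite author's own statement) =====
-- stated objective: alternative
-- what changed: A accumulates a current-heading/buffer state and flushes it on each heading and at EOF; B first rstrips all lines, then carves the line list into heading-delimited segments with a span helper and joins each segment directly.
import Mathlib
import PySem

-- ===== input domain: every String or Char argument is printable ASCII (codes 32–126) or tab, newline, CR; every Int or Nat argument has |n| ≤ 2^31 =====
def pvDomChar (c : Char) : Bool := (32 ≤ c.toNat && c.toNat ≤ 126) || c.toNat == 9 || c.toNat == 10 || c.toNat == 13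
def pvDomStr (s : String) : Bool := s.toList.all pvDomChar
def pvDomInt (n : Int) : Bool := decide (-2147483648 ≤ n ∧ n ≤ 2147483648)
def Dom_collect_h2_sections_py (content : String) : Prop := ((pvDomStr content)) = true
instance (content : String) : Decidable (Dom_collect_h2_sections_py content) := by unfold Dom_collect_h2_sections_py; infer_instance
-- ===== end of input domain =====

-- B replaces A's stateful heading/buffer/flush accumulator with carving the rstripped
-- line list into segments at the heading positions (alternative decomposition, same cost).

-- ===== PORT A =====
-- one loop step of A: state = (sections, current_heading, buffer)
def pvStepA (st : PySem.Dict String String × String × List String) (raw : String) :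
    PySem.Dict String String × String × List String :=
  let line := PySem.Str.rstrip raw
  if PySem.Str.startswith line "## " then
    let sections :=
      if st.2.1 ≠ "" then
        let body := PySem.Str.strip (PySem.Str.join "\n" st.2.2)
        if body ≠ "" then PySem.Dict.insert st.1 st.2.1 body else st.1
      else st.1
    (sections, PySem.Str.strip line, [])
  else
    if st.2.1 ≠ "" then (st.1, st.2.1, st.2.2 ++ [line]) else st

def collect_h2_sections_py (content : String) : List (String × String) :=
  let st := (PySem.Str.splitlines content).foldl pvStepA (PySem.Dict.empty, "", [])
  let sections :=
    if st.2.1 ≠ "" then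
      let body := PySem.Str.strip (PySem.Str.join "\n" st.2.2)
      if body ≠ "" then PySem.Dict.insert st.1 st.2.1 body else st.1
    else st.1
  sections.items

-- ===== PORT B =====
-- port of Source B's _span_body: the index walk, then the two slices
def pvSpanIdx (lines : List String) (k : Nat) : Nat :=
  if h : k < lines.length then
    if PySem.Str.startswith lines[k] "## " then k else pvSpanIdx lines (k + 1)
  else k
termination_by lines.length - k

def pvSpanBody (lines : List String) : List String × List String :=
  let k := pvSpanIdx lines 0
  (lines.take k, lines.drop k)

-- port of Source B's `while rest:` loop
def pvGo (sections : PySem.Dict String String) (rest : List String) :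
    PySem.Dict String String :=
  match rest with
  | [] => sections
  | heading :: tail =>
    let p := pvSpanBody tail
    let body := PySem.Str.strip (PySem.Str.join "\n" p.1)
    let sections' := if body ≠ "" then PySem.Dict.insert sections heading body else sections
    pvGo sections' p.2
termination_by rest.length
decreasing_by
  simp only [pvSpanBody, List.length_drop, List.length_cons]
  omega

def collect_h2_sections_py_alt (content : String) : List (String × String) :=
  let lines := (PySem.Str.splitlines content).map PySem.Str.rstrip
  (pvGo PySem.Dict.empty (pvSpanBody lines).2).items

-- ===== PRECONDITION & SPEC =====
def Spec_collect_h2_sections_py (content : String) (out : List (String × String)) : Prop := out = collect_h2_sections_py_alt content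
instance (content : String) (out : List (String × String)) : Decidable (Spec_collect_h2_sections_py content out) := by unfold Spec_collect_h2_sections_py; infer_instance

-- ===== CLAIM (what is proved, stated in full; the proofs are below) =====
def Claim_equal_collect_h2_sections_py : Prop := ∀ (content : String), Dom_collect_h2_sections_py content → Spec_collect_h2_sections_py content (collect_h2_sections_py content)

-- ===== LEMMAS AND PROOFS =====

theorem pvChars_rstrip_idem (cs : List Char) :
    PySem.Chars.rstrip (PySem.Chars.rstrip cs) = PySem.Chars.rstrip cs := by
  simp [PySem.Chars.rstrip, List.dropWhile_idempotent]

theorem pvRstrip_idem (s : String) : PySem.Str.rstrip (PySem.Str.rstrip s) = PySem.Str.rstrip s := by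
  have h : (PySem.Str.rstrip (PySem.Str.rstrip s)).toList = (PySem.Str.rstrip s).toList := by
    simp [PySem.Str.toList_rstrip, pvChars_rstrip_idem]
  calc PySem.Str.rstrip (PySem.Str.rstrip s)
      = String.ofList (PySem.Str.rstrip (PySem.Str.rstrip s)).toList := by rw [String.ofList_toList]
    _ = String.ofList (PySem.Str.rstrip s).toList := by rw [h]
    _ = PySem.Str.rstrip s := String.ofList_toList

-- on a line that is already rstripped and starts with "## ", Python's .strip() is the identity
theorem pvStrip_clean_heading (l : String) (hc : PySem.Str.rstrip l = l)
    (h : PySem.Str.startswith l "## " = true) : PySem.Str.strip l = l := by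
  rw [PySem.Str.startswith_eq] at h
  rw [PySem.Chars.startswith_iff] at h
  obtain ⟨t, ht⟩ := h
  have hcl : PySem.Chars.rstrip l.toList = l.toList := by
    have := congrArg String.toList hc
    rwa [PySem.Str.toList_rstrip] at this
  have hlist : PySem.Chars.strip l.toList = l.toList := by
    rw [PySem.Chars.strip]
    have hls : PySem.Chars.lstrip l.toList = l.toList := by
      rw [PySem.Chars.lstrip, ← ht]
      simp
      decide
    rw [hls, hcl]
  have h2 : (PySem.Str.strip l).toList = l.toList := by
    rw [PySem.Str.toList_strip, hlist]
  calc PySem.Str.strip l = String.ofList (PySem.Str.strip l).toList := by rw [String.ofList_toList]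
    _ = String.ofList l.toList := by rw [h2]
    _ = l := String.ofList_toList

-- structural recursion equations for B's _span_body
theorem pvSpanIdx_shift (ls : List String) (l : String) (k : Nat) :
    pvSpanIdx (l :: ls) (k + 1) = pvSpanIdx ls k + 1 := by
  fun_induction pvSpanIdx ls k with
  | case1 k h hh =>
    rw [pvSpanIdx, dif_pos (show k + 1 < (l :: ls).length by simp; omega)]
    rw [List.getElem_cons_succ, if_pos hh]
  | case2 k h hh ih =>
    rw [pvSpanIdx, dif_pos (show k + 1 < (l :: ls).length by simp; omega)]
    rw [List.getElem_cons_succ, if_neg hh, ih]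
  | case3 k h =>
    rw [pvSpanIdx, dif_neg (show ¬ (k + 1 < (l :: ls).length) by simp; omega)]

theorem pvSpanBody_nil : pvSpanBody [] = ([], []) := by
  simp [pvSpanBody, pvSpanIdx]

theorem pvSpanBody_cons (l : String) (ls : List String) :
    pvSpanBody (l :: ls) =
      if PySem.Str.startswith l "## " then ([], l :: ls)
      else (l :: (pvSpanBody ls).1, (pvSpanBody ls).2) := by
  have h0 : pvSpanIdx (l :: ls) 0 =
      if PySem.Str.startswith l "## " then 0 else pvSpanIdx ls 0 + 1 := by
    rw [pvSpanIdx, dif_pos (show 0 < (l :: ls).length by simp)]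
    by_cases hl : PySem.Str.startswith l "## "
    · rw [List.getElem_cons_zero, if_pos hl, if_pos hl]
    · rw [List.getElem_cons_zero, if_neg hl, if_neg hl]
      exact pvSpanIdx_shift ls l 0
  by_cases hl : PySem.Str.startswith l "## "
  · rw [if_pos hl]
    simp only [pvSpanBody, h0, if_pos hl]
    rfl
  · rw [if_neg hl]
    simp only [pvSpanBody, h0, if_neg hl]
    rw [List.take_succ_cons, List.drop_succ_cons]

-- A's flush block (the code A runs on meeting a heading, and again after the loop)
def pvFlush (d : PySem.Dict String String) (h : String) (buf : List String) :
    PySem.Dict String String :=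
  if h ≠ "" then
    let body := PySem.Str.strip (PySem.Str.join "\n" buf)
    if body ≠ "" then PySem.Dict.insert d h body else d
  else d

def pvFinish (st : PySem.Dict String String × String × List String) :
    PySem.Dict String String :=
  pvFlush st.1 st.2.1 st.2.2

theorem pvHeading_ne (l : String) (h : PySem.Str.startswith l "## " = true) : l ≠ "" := by
  intro hl; subst hl; exact absurd h (by decide)

-- A's step on an already-rstripped line, phrased with pvFlush
theorem pvStepA_clean (st : PySem.Dict String String × String × List String) (l : String)
    (hc : PySem.Str.rstrip l = l) :
    pvStepA st l =
      if PySem.Str.startswith l "## " then (pvFlush st.1 st.2.1 st.2.2, l, [])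
      else if st.2.1 ≠ "" then (st.1, st.2.1, st.2.2 ++ [l]) else st := by
  by_cases hl : PySem.Str.startswith l "## "
  · rw [if_pos hl]
    simp only [pvStepA, hc, if_pos hl, pvFlush]
    rw [pvStrip_clean_heading l hc hl]
  · rw [if_neg hl]
    simp only [pvStepA, hc, if_neg hl]

theorem pvFlush_empty (d : PySem.Dict String String) (buf : List String) :
    pvFlush d "" buf = d := by simp [pvFlush]

theorem pvGo_nil (d : PySem.Dict String String) : pvGo d [] = d := by rw [pvGo]

theorem pvGo_cons (d : PySem.Dict String String) (l : String) (ls : List String)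
    (hne : l ≠ "") : pvGo d (l :: ls) = pvGo (pvFlush d l (pvSpanBody ls).1) (pvSpanBody ls).2 := by
  rw [pvGo]
  simp only [pvFlush, if_pos hne]

-- main loop invariant, active-section case (A carries heading h and buffer buf)
theorem pvLoop_active (lines : List String) :
    ∀ (d : PySem.Dict String String) (h : String) (buf : List String),
      h ≠ "" → (∀ l ∈ lines, PySem.Str.rstrip l = l) →
      pvFinish (lines.foldl pvStepA (d, h, buf)) =
      pvGo (pvFlush d h (buf ++ (pvSpanBody lines).1)) (pvSpanBody lines).2 := by
  induction lines with
  | nil =>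
    intro d h buf hh _
    rw [pvSpanBody_nil]
    simp only [List.foldl_nil, List.append_nil, pvGo_nil]
    rfl
  | cons l ls ih =>
    intro d h buf hh hcl
    have hcls : ∀ x ∈ ls, PySem.Str.rstrip x = x := fun x hx => hcl x (List.mem_cons_of_mem _ hx)
    have hcl0 : PySem.Str.rstrip l = l := hcl l List.mem_cons_self
    rw [List.foldl_cons, pvStepA_clean (d, h, buf) l hcl0, pvSpanBody_cons]
    by_cases hl : PySem.Str.startswith l "## "
    · rw [if_pos hl, if_pos hl]
      have hne := pvHeading_ne l hl
      rw [ih (pvFlush d h buf) l [] hne hcls, pvGo_cons _ _ _ hne]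
      rw [List.nil_append, List.append_nil]
    · rw [if_neg hl, if_neg hl, if_pos hh]
      rw [ih d h (buf ++ [l]) hh hcls, List.append_assoc]
      rfl

-- main loop invariant, prologue case (no current heading yet)
theorem pvLoop_prologue (lines : List String) :
    ∀ (d : PySem.Dict String String) (buf : List String),
      (∀ l ∈ lines, PySem.Str.rstrip l = l) →
      pvFinish (lines.foldl pvStepA (d, "", buf)) =
      pvGo d (pvSpanBody lines).2 := by
  induction lines with
  | nil =>
    intro d buf _
    rw [pvSpanBody_nil]
    simp only [List.foldl_nil, pvGo_nil]
    exact pvFlush_empty d buf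
  | cons l ls ih =>
    intro d buf hcl
    have hcls : ∀ x ∈ ls, PySem.Str.rstrip x = x := fun x hx => hcl x (List.mem_cons_of_mem _ hx)
    have hcl0 : PySem.Str.rstrip l = l := hcl l List.mem_cons_self
    rw [List.foldl_cons, pvStepA_clean (d, "", buf) l hcl0, pvSpanBody_cons]
    by_cases hl : PySem.Str.startswith l "## "
    · rw [if_pos hl, if_pos hl]
      have hne := pvHeading_ne l hl
      rw [pvFlush_empty]
      rw [pvLoop_active ls d l [] hne hcls, pvGo_cons _ _ _ hne, List.nil_append]
    · rw [if_neg hl, if_neg hl, if_neg (by simp : ¬ ("" : String) ≠ "")]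
      exact ih d buf hcls

-- A's step only reads its line through rstrip, so pre-rstripping the rows changes nothing
theorem pvStepA_rstrip (st : PySem.Dict String String × String × List String) (r : String) :
    pvStepA st (PySem.Str.rstrip r) = pvStepA st r := by
  simp only [pvStepA, pvRstrip_idem]

theorem pvFold_map_rstrip (rows : List String) :
    ∀ st : PySem.Dict String String × String × List String,
      (rows.map PySem.Str.rstrip).foldl pvStepA st = rows.foldl pvStepA st := by
  induction rows with
  | nil => intro st; rfl
  | cons r rs ih =>
    intro st
    rw [List.map_cons, List.foldl_cons, List.foldl_cons, pvStepA_rstrip, ih]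

-- ===== VERDICT (by name: the statement is the Claim_ definition above) =====
theorem collect_h2_sections_py_spec : Claim_equal_collect_h2_sections_py := by
  intro content _
  unfold Spec_collect_h2_sections_py collect_h2_sections_py collect_h2_sections_py_alt
  have hcl : ∀ l ∈ (PySem.Str.splitlines content).map PySem.Str.rstrip,
      PySem.Str.rstrip l = l := by
    intro l hl
    obtain ⟨r, _, rfl⟩ := List.mem_map.mp hl
    exact pvRstrip_idem r
  have h1 := pvLoop_prologue ((PySem.Str.splitlines content).map PySem.Str.rstrip)
    PySem.Dict.empty [] hcl
  rw [pvFold_map_rstrip] at h1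
  exact congrArg PySem.Dict.items h1
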